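-- pv_equiv track=rewrite | github.com/Klapperhorn/TwitterAPI-2_Analysis | myTwitterLibrary/analysis.py | WordlistFilter
-- ===== SOURCE A (Python) =====
-- def WordlistFilter(Lemmata, by):
--     # Lemmata = Source List of words to filter
--     # by = Rule List of words to filter for
--
--     x=False
--
--     if type(Lemmata)==str:
--         Lemmata=Lemmata.split()
--
--     if type(Lemmata)==list:
--
--
--         by=[i.lower() for i in by]
--
--
--         # As soon as the function finds a Word from the word list, x turns to True
--         if len(Lemmata)>0:
--             for i in Lemmata:
--                 if type(i)==str:
--                     if i.lower() in by:
--                         x= True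
--     return x
-- ===== SOURCE B (Python) =====
-- def WordlistFilter(Lemmata, by):
--     # Lemmata = Source List of words to filter
--     # by = Rule List of words to filter for
--     if type(Lemmata) == str:
--         Lemmata = Lemmata.split()
--     if type(Lemmata) != list:
--         return False
--     # sort both lowered lists and walk them in parallel (merge scan);
--     # a common element exists iff the two sorted sequences ever coincide.
--     ws = sorted(w.lower() for w in Lemmata if type(w) == str)
--     rs = sorted(r.lower() for r in by)
--     i = j = 0
--     while i < len(ws) and j < len(rs):
--         if ws[i] == rs[j]:
--             return True
--         if ws[i] < rs[j]:
--             i += 1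
--         else:
--             j += 1
--     return False
-- ===== Notes on version B (the rewrite author's own statement) =====
-- stated objective: alternative
-- what changed: Replaces the per-word membership scan of the lowered rule list with sort-then-merge: both lowered lists are sorted and a two-pointer merge walk detects a shared element without any membership test.
import Mathlib
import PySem

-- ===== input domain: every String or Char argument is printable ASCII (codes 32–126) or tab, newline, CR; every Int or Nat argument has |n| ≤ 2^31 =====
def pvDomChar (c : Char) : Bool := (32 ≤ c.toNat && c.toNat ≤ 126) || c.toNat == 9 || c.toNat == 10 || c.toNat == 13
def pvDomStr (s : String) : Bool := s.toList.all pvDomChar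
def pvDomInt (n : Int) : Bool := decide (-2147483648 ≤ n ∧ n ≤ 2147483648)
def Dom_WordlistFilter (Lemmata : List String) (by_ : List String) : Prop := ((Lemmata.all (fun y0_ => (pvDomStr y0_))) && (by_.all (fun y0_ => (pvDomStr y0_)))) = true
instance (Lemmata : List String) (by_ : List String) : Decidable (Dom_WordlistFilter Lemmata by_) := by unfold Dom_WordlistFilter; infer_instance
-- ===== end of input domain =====

-- B replaces A's per-word membership scan with sort-then-merge: both lowered lists are
-- sorted and a two-pointer merge walk detects a shared element (alternative algorithm).


-- ===== PORT A =====
-- Port of A: latching flag x, `by` lowered to a list, per-element lowered membership loop.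
-- (Lemmata is typed List String here, so A's `type(Lemmata)==str` split branch and the
--  `type(i)==str` element guard are identically taken/skipped.)
def WordlistFilter (Lemmata : List String) (by_ : List String) : Bool :=
  let x := false
  let by2 := by_.map PySem.Str.lower
  if Lemmata.length > 0 then
    Lemmata.foldl (fun x i => if by2.contains (PySem.Str.lower i) then true else x) x
  else x

-- ===== PORT B =====
-- B's two-pointer merge walk over two sorted lists: advance the smaller head,
-- report true on equal heads, false when either list runs out.
def pvScan : List String → List String → Bool
  | [], _ => false
  | _ :: _, [] => false
  | a :: as, b :: bs =>
    if a = b then true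
    else if a < b then pvScan as (b :: bs)
    else pvScan (a :: as) bs

-- Port of B: lower both lists, sort them, then merge-scan for a coincidence.
def WordlistFilter_alt (Lemmata : List String) (by_ : List String) : Bool :=
  let ws := PySem.List.sorted (Lemmata.map PySem.Str.lower) (fun x => x) false
  let rs := PySem.List.sorted (by_.map PySem.Str.lower) (fun x => x) false
  pvScan ws rs

-- ===== PRECONDITION & SPEC =====
def Spec_WordlistFilter (Lemmata : List String) (by_ : List String) (out : Bool) : Prop := out = WordlistFilter_alt Lemmata by_
instance (Lemmata : List String) (by_ : List String) (out : Bool) : Decidable (Spec_WordlistFilter Lemmata by_ out) := by unfold Spec_WordlistFilter; infer_instance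

-- ===== CLAIM (what is proved, stated in full; the proofs are below) =====
def Claim_equal_WordlistFilter : Prop := ∀ (Lemmata : List String) (by_ : List String), Dom_WordlistFilter Lemmata by_ → Spec_WordlistFilter Lemmata by_ (WordlistFilter Lemmata by_)

-- ===== LEMMAS AND PROOFS =====

-- A's loop latches `true` as soon as any element matches: it computes acc || any p.
theorem pvFoldA (p : String → Bool) (L : List String) (acc : Bool) :
    L.foldl (fun x i => if p i then true else x) acc = (acc || L.any p) := by
  induction L generalizing acc with
  | nil => simp
  | cons h t ih =>
    simp only [List.foldl_cons, List.any_cons, ih]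
    cases hp : p h <;> cases acc <;> simp

-- The merge scan on two (≤)-sorted lists returns true iff the lists share an element.
theorem pvScan_true_iff : ∀ (ws rs : List String),
    ws.Pairwise (· ≤ ·) → rs.Pairwise (· ≤ ·) →
    (pvScan ws rs = true ↔ ∃ x, x ∈ ws ∧ x ∈ rs) := by
  intro ws
  induction ws with
  | nil => intro rs _ _; simp [pvScan]
  | cons a as ihw =>
    intro rs hw
    induction rs with
    | nil => intro _; simp [pvScan]
    | cons b bs ihr =>
      intro hr
      rw [List.pairwise_cons] at hw hr
      by_cases hab : a = b
      · subst hab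
        simp only [pvScan, if_true, true_iff]
        exact ⟨a, List.mem_cons_self .., List.mem_cons_self ..⟩
      · by_cases hlt : a < b
        · rw [show pvScan (a :: as) (b :: bs) =
              pvScan as (b :: bs) by simp [pvScan, hab, hlt]]
          rw [ihw (b :: bs) hw.2 (List.pairwise_cons.mpr hr)]
          constructor
          · rintro ⟨x, hx1, hx2⟩; exact ⟨x, List.mem_cons_of_mem _ hx1, hx2⟩
          · rintro ⟨x, hx1, hx2⟩
            rcases List.mem_cons.mp hx1 with rfl | hx1
            · exfalso
              rcases List.mem_cons.mp hx2 with rfl | hx2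
              · exact hab rfl
              · exact absurd (hr.1 _ hx2) (not_le.mpr hlt).elim
            · exact ⟨x, hx1, hx2⟩
        · have hba : b < a := lt_of_le_of_ne (not_lt.mp hlt) (fun h => hab h.symm)
          rw [show pvScan (a :: as) (b :: bs) =
              pvScan (a :: as) bs by simp [pvScan, hab, hlt]]
          rw [ihr hr.2]
          constructor
          · rintro ⟨x, hx1, hx2⟩; exact ⟨x, hx1, List.mem_cons_of_mem _ hx2⟩
          · rintro ⟨x, hx1, hx2⟩
            rcases List.mem_cons.mp hx2 with rfl | hx2
            · exfalso
              rcases List.mem_cons.mp hx1 with rfl | hx1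
              · exact hab rfl
              · exact absurd (hw.1 _ hx1) (not_le.mpr hba)
            · exact ⟨x, hx1, hx2⟩

theorem WordlistFilter_spec : Claim_equal_WordlistFilter := by
  intro Lemmata by_ _
  unfold Spec_WordlistFilter WordlistFilter WordlistFilter_alt
  have hscan :
      pvScan (PySem.List.sorted (Lemmata.map PySem.Str.lower) (fun x => x) false)
             (PySem.List.sorted (by_.map PySem.Str.lower) (fun x => x) false) =
      Lemmata.any (fun i => (by_.map PySem.Str.lower).contains (PySem.Str.lower i)) := by
    rw [Bool.eq_iff_iff]
    rw [pvScan_true_iff _ _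
      (by simpa using PySem.List.sorted_pairwise (Lemmata.map PySem.Str.lower) (fun x => x))
      (by simpa using PySem.List.sorted_pairwise (by_.map PySem.Str.lower) (fun x => x))]
    simp only [PySem.List.mem_sorted, List.any_eq_true, List.mem_map, List.contains_iff_mem]
    constructor
    · rintro ⟨x, ⟨i, hi, rfl⟩, hx2⟩
      exact ⟨i, hi, hx2⟩
    · rintro ⟨i, hi, hc⟩
      exact ⟨PySem.Str.lower i, ⟨i, hi, rfl⟩, hc⟩
  rcases Lemmata with _ | ⟨h, t⟩
  · simpa using hscan.symm
  · simp only [List.length_cons, if_pos (Nat.succ_pos _), pvFoldA, Bool.false_or]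
    exact hscan.symm
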